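-- pv_equiv track=rewrite | github.com/Min-su-Jeong/Algorithm_Study | 프로그래머스/unrated/135808. 과일 장수/과일 장수.py | solution
-- ===== SOURCE A (Python) =====
-- def solution(k, m, score):
--     res = 0
--     score = sorted(score, reverse = True) # 내림차순 정렬(사과 점수)
--
--     for i in range(0, len(score), m): # m개씩 건너뛰어 반복
--         tmp = score[i:i+m]            # m개 단위로 분할
--         if len(tmp) == m:             # 길이가 m이면
--             res += min(tmp) * m       # 현재 m개씩 잘린 사과들 중에 (가장 작은 값 * m) 더하기
--
--     return res
-- ===== SOURCE B (Python) =====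
-- def solution(k, m, score):
--     # Run-length strategy: count each score's occurrences once, walk the
--     # distinct scores in descending order, and for each value's run compute
--     # arithmetically how many full-box minimum positions fall inside it.
--     cnt = {}
--     for s in score:
--         cnt[s] = cnt.get(s, 0) + 1
--     total = 0
--     pos = 0
--     for v in sorted(cnt, reverse=True):
--         c = cnt[v]
--         total += ((pos + c) // m - pos // m) * v
--         pos += c
--     return m * total
-- ===== Notes on version B (the rewrite author's own statement) =====
-- stated objective: alternative
-- what changed: B never materialises or chunks the sorted score list: it builds a count dictionary in one pass, sorts only the distinct scores descending, and for each value's run counts the full-box minimum positions arithmetically with floor division instead of slicing m-blocks and taking min of each.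
-- outside the precondition, e.g. on solution(1, -2, [3, 1]): A returns 0, B returns 6; on solution(1, 0, [1]): A raises ValueError, B raises ZeroDivisionError
import Mathlib
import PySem

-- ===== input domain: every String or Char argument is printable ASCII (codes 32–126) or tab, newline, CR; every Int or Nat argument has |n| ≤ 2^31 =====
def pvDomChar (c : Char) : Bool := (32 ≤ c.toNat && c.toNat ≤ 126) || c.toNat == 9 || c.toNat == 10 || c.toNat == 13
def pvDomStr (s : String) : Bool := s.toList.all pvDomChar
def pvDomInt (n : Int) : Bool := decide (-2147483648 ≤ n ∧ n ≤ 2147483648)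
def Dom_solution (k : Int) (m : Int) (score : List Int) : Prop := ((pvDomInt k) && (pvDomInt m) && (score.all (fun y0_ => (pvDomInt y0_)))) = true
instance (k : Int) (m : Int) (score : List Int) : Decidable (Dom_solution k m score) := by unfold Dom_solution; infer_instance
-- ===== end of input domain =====

-- B replaces A's sort-and-chunk scan with a run-length algorithm: a count
-- dictionary, the distinct scores sorted descending, and per run an arithmetic
-- count of the full-box minimum positions; objective: alternative.

-- ===== PORT A =====
def solution (k : Int) (m : Int) (score : List Int) : Int :=
  let score' := PySem.List.sorted score (fun x => x) true
  (PySem.List.pyRange 0 (PySem.List.len score') m).foldl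
    (fun res i =>
      let tmp := PySem.List.slice score' (some i) (some (i + m))
      if PySem.List.len tmp = m then
        -- min(tmp) raises only on empty tmp; here len tmp = m ≥ 1 whenever this branch runs
        res + (PySem.List.min? tmp (fun x => x)).getD 0 * m
      else res) 0

-- ===== PORT B =====
def solution_alt (k : Int) (m : Int) (score : List Int) : Int :=
  let cnt := score.foldl (fun d s => PySem.Dict.insert d s (PySem.Dict.getD d s 0 + 1)) PySem.Dict.empty
  let res := (PySem.List.sorted (PySem.Dict.keys cnt) (fun x => x) true).foldl
    (fun (tp : Int × Int) v =>
      let c := PySem.Dict.getD cnt v 0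
      (tp.1 + (PySem.Int.floordiv (tp.2 + c) m - PySem.Int.floordiv tp.2 m) * v, tp.2 + c))
    (0, 0)
  m * res.1

-- ===== PRECONDITION & SPEC =====
-- m ≤ 0 is outside the natural box-size domain: on m = 0 A raises ValueError
-- (range step 0) and B raises ZeroDivisionError; for negative m (a meaningless
-- box size) A returns 0 only because range() happens to be empty, and B's
-- floor-division position count is not meaningful there — excluded.
def Pre_solution (k : Int) (m : Int) (score : List Int) : Prop := 0 < m
instance (k : Int) (m : Int) (score : List Int) : Decidable (Pre_solution k m score) := by unfold Pre_solution; infer_instance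
def pvWitness_solution : Int × Int × List Int := (4, 3, [1, 2, 3, 1, 2, 3, 1])

def Spec_solution (k : Int) (m : Int) (score : List Int) (out : Int) : Prop := out = solution_alt k m score
instance (k : Int) (m : Int) (score : List Int) (out : Int) : Decidable (Spec_solution k m score out) := by unfold Spec_solution; infer_instance

-- ===== CLAIM (what is proved, stated in full; the proofs are below) =====
def Claim_equal_solution : Prop := ∀ (k : Int) (m : Int) (score : List Int), Dom_solution k m score → Pre_solution k m score → Spec_solution k m score (solution k m score)

-- ===== LEMMAS AND PROOFS =====

lemma pyRange_pos_nil (a b s : Int) (hs : 0 < s) (hba : b ≤ a) : PySem.List.pyRange a b s = [] := by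
  rw [PySem.List.pyRange_of_pos a b hs, if_neg (by omega)]
  simp

lemma pyRange_pos_cons (a b s : Int) (hs : 0 < s) (hab : a < b) :
    PySem.List.pyRange a b s = a :: PySem.List.pyRange (a + s) b s := by
  rw [PySem.List.pyRange_of_pos a b hs, PySem.List.pyRange_of_pos (a+s) b hs, if_pos hab]
  have key : ((b - a + s - 1) / s).toNat
      = (if a + s < b then ((b - (a + s) + s - 1) / s).toNat else 0) + 1 := by
    have h1 : b - a + s - 1 = (b - a - 1) + 1 * s := by ring
    have h2 : (b - a + s - 1) / s = (b - a - 1) / s + 1 := by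
      rw [h1, Int.add_mul_ediv_right _ _ (by omega)]
    split_ifs with h
    · have h3 : b - (a + s) + s - 1 = b - a - 1 := by ring
      rw [h2, h3]
      have : 0 ≤ (b - a - 1) / s := Int.ediv_nonneg (by omega) (by omega)
      omega
    · have h4 : (b - a - 1) / s = 0 := by
        apply Int.ediv_eq_zero_of_lt (by omega) (by omega)
      omega
  rw [key, List.range_succ_eq_map]
  simp only [List.map_cons, List.map_map]
  refine congrArg₂ _ (by simp) ?_
  apply List.map_congr_left
  intro x _
  simp [Function.comp]
  ring

lemma pyRange_pos_shift (a b s : Int) (hs : 0 < s) :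
    PySem.List.pyRange a b s = (PySem.List.pyRange 0 (b - a) s).map (fun x => a + x) := by
  rw [PySem.List.pyRange_of_pos a b hs, PySem.List.pyRange_of_pos 0 (b-a) hs, List.map_map]
  congr 1
  · funext x; simp
  · simp only [sub_zero]
    congr 1
    split_ifs with h1 h2 h2 <;> first | rfl | omega

lemma pyRange_pos_shift_step (a b s : Int) (hs : 0 < s) :
    PySem.List.pyRange (a + s) b s = (PySem.List.pyRange a (b - s) s).map (fun x => x + s) := by
  rw [pyRange_pos_shift (a+s) b s hs, pyRange_pos_shift a (b-s) s hs, List.map_map]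
  have : b - (a + s) = b - s - a := by ring
  rw [this]
  apply List.map_congr_left
  intro x _
  simp [Function.comp]; ring

lemma getLast_le_of_antitone (xs : List Int) (h : xs ≠ [])
    (hp : xs.Pairwise (fun a b => b ≤ a)) : ∀ y ∈ xs, xs.getLast h ≤ y := by
  induction xs with
  | nil => simp at h
  | cons x t ih =>
    rcases List.pairwise_cons.mp hp with ⟨hx, ht⟩
    intro y hy
    by_cases he : t = []
    · subst he; simp at hy; simp [hy]
    · rw [List.getLast_cons he]
      rcases List.mem_cons.mp hy with rfl | hyt
      · exact hx _ (List.getLast_mem he)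
      · exact ih he ht y hyt

lemma min?_antitone (xs : List Int) (h : xs ≠ [])
    (hp : xs.Pairwise (fun a b => b ≤ a)) :
    PySem.List.min? xs (fun x => x) = some (xs.getLast h) := by
  rcases ho : PySem.List.min? xs (fun x => x) with _ | x
  · exact absurd ((PySem.List.min?_eq_none_iff xs _).mp ho) h
  · have hm := PySem.List.min?_mem ho
    have h1 := PySem.List.min?_isMin ho _ (List.getLast_mem h)
    have h2 := getLast_le_of_antitone xs h hp x hm
    simp [le_antisymm h1 h2]

lemma slice_block_shift (d : List Int) (m j : Int) (hm : 0 < m) (hj : 0 ≤ j) :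
    PySem.List.slice d (some (j + m)) (some (j + m + m))
      = PySem.List.slice (d.drop m.toNat) (some j) (some (j + m)) := by
  rw [PySem.List.slice_toNat _ (by omega) (by omega), PySem.List.slice_toNat _ hj (by omega),
    List.drop_drop]
  have h1 : m.toNat + j.toNat = (j + m).toNat := by omega
  have h2 : (j + m + m).toNat - (j + m).toNat = (j + m).toNat - j.toNat := by omega
  rw [h1, h2]

lemma sums_eq (m : Int) (hm : 0 < m) :
    ∀ (n : Nat) (d : List Int), d.length = n → d.Pairwise (fun a b => b ≤ a) →
    ((PySem.List.pyRange 0 (d.length : Int) m).map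
      (fun i => if ((PySem.List.slice d (some i) (some (i + m))).length : Int) = m then
          (PySem.List.min? (PySem.List.slice d (some i) (some (i + m))) (fun x => x)).getD 0 * m
        else 0)).sum
    = m * ((PySem.List.pyRange (m - 1) (d.length : Int) m).map
      (fun i => PySem.List.pyGetD d i 0)).sum := by
  intro n
  induction n using Nat.strong_induction_on with
  | _ n ih =>
    intro d hlen hp
    by_cases hsize : (d.length : Int) < m
    · -- fewer than m apples: no full box on either side
      rw [pyRange_pos_nil (m-1) _ m hm (by omega)]
      by_cases h0 : d = []
      · subst h0
        rw [pyRange_pos_nil 0 _ m hm (by simp)]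
        simp
      · have hlpos : 0 < (d.length : Int) := by
          simp [List.length_pos_iff]; exact h0
        rw [pyRange_pos_cons 0 _ m hm hlpos, pyRange_pos_nil (0+m) _ m hm (by omega)]
        have hs : PySem.List.slice d (some 0) (some (0 + m)) = d := by
          rw [PySem.List.slice_toNat _ (le_refl 0) (by omega)]
          simp
          omega
        simp only [List.map_cons, List.map_nil, List.sum_cons, List.sum_nil, hs]
        rw [if_neg (by omega)]
        simp
    · rw [not_lt] at hsize
      have hmt1 : 0 < m.toNat := by omega
      have hmt2 : m.toNat ≤ d.length := by omega
      set t := d.drop m.toNat with ht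
      have hlt : (t.length : Int) = (d.length : Int) - m := by
        simp [ht]; omega
      have hpt : t.Pairwise (fun a b => b ≤ a) := hp.drop
      have hihlen : t.length < n := by
        simp [ht]; omega
      have IH := ih t.length hihlen t rfl hpt
      -- A side
      rw [pyRange_pos_cons 0 _ m hm (by omega), pyRange_pos_shift_step 0 _ m hm]
      simp only [List.map_cons, List.sum_cons, List.map_map]
      have hblock : PySem.List.slice d (some 0) (some (0 + m)) = d.take m.toNat := by
        rw [PySem.List.slice_toNat _ (le_refl 0) (by omega)]
        simp
      have hlenblock : ((PySem.List.slice d (some 0) (some (0 + m))).length : Int) = m := by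
        rw [hblock]
        simp [List.length_take]
        omega
      rw [if_pos hlenblock]
      have hmapA : ((PySem.List.pyRange 0 ((d.length : Int) - m) m).map
          ((fun i => if ((PySem.List.slice d (some i) (some (i + m))).length : Int) = m then
            (PySem.List.min? (PySem.List.slice d (some i) (some (i + m))) (fun x => x)).getD 0 * m
          else 0) ∘ (fun x => x + m))).sum
          = ((PySem.List.pyRange 0 (t.length : Int) m).map
          (fun i => if ((PySem.List.slice t (some i) (some (i + m))).length : Int) = m then
            (PySem.List.min? (PySem.List.slice t (some i) (some (i + m))) (fun x => x)).getD 0 * m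
          else 0)).sum := by
        rw [hlt]
        apply congrArg
        apply List.map_congr_left
        intro x hx
        have hx0 : 0 ≤ x := ((PySem.List.mem_pyRange_iff_of_pos hm x).mp hx).1
        simp only [Function.comp]
        rw [slice_block_shift d m x hm hx0]
      rw [hmapA, IH]
      -- B side
      rw [pyRange_pos_cons (m-1) ((d.length:Int)) m hm (by omega)]
      have hBtail : PySem.List.pyRange (m - 1 + m) (d.length : Int) m
          = (PySem.List.pyRange (m-1) ((d.length : Int) - m) m).map (fun x => x + m) :=
        pyRange_pos_shift_step (m-1) _ m hm
      rw [hBtail]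
      simp only [List.map_cons, List.sum_cons, List.map_map]
      have hmapB : ((PySem.List.pyRange (m-1) ((d.length : Int) - m) m).map
          ((fun i => PySem.List.pyGetD d i 0) ∘ (fun x => x + m))).sum
          = ((PySem.List.pyRange (m-1) (t.length : Int) m).map
          (fun i => PySem.List.pyGetD t i 0)).sum := by
        rw [hlt]
        apply congrArg
        apply List.map_congr_left
        intro x hx
        have hx0 : m - 1 ≤ x := ((PySem.List.mem_pyRange_iff_of_pos hm x).mp hx).1
        simp only [Function.comp]
        rw [PySem.List.pyGetD_of_nonneg _ _ (by omega), PySem.List.pyGetD_of_nonneg _ _ (by omega),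
          ht, List.getD_eq_getElem?_getD, List.getD_eq_getElem?_getD, List.getElem?_drop]
        have : m.toNat + x.toNat = (x + m).toNat := by omega
        rw [this]
      rw [hmapB]
      -- the heads
      have hne : d.take m.toNat ≠ [] := by
        simp [List.length_pos_iff.symm, List.length_take]
        omega
      rw [hblock, min?_antitone _ hne hp.take]
      have hgl : (d.take m.toNat).getLast hne = d[m.toNat - 1]'(by omega) := by
        rw [List.getLast_eq_getElem]
        simp [List.length_take]
        congr 1
        omega
      rw [PySem.List.pyGetD_eq_getElem d 0 (by omega) (by omega)]
      have hidx : (m - 1).toNat = m.toNat - 1 := by omega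
      simp only [Option.getD_some, hgl, hidx]
      ring

-- positional indicator sum: the elements of t sitting at a full-box minimum
-- position (global index ≡ -1 mod m), when t starts at global index pos
def hitSum (m : Int) : Int → List Int → Int
  | _, [] => 0
  | pos, x :: t => (if (pos + 1) % m = 0 then x else 0) + hitSum m (pos + 1) t

lemma hitSum_append (m : Int) (u t : List Int) :
    ∀ pos, hitSum m pos (u ++ t) = hitSum m pos u + hitSum m (pos + u.length) t := by
  induction u with
  | nil => intro pos; simp [hitSum]
  | cons x u ih =>
    intro pos
    simp only [List.cons_append, hitSum, ih (pos + 1), List.length_cons, Nat.cast_add,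
      Nat.cast_one]
    have h : pos + 1 + (u.length : Int) = pos + ((u.length : Int) + 1) := by ring
    rw [h, add_assoc]

lemma hitSum_period (m : Int) (t : List Int) :
    ∀ pos, hitSum m (pos + m) t = hitSum m pos t := by
  induction t with
  | nil => intro pos; simp [hitSum]
  | cons x t ih =>
    intro pos
    simp only [hitSum]
    have h1 : pos + m + 1 = pos + 1 + m * 1 := by ring
    rw [h1, Int.add_mul_emod_self_left]
    have h2 : pos + 1 + m * 1 = pos + 1 + m := by ring
    rw [h2, ih (pos + 1)]

lemma hitSum_small (m : Int) (u : List Int) :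
    ∀ pos, 0 ≤ pos → pos + (u.length : Int) < m → hitSum m pos u = 0 := by
  induction u with
  | nil => intro pos _ _; simp [hitSum]
  | cons x u ih =>
    intro pos h0 hlt
    simp only [List.length_cons, Nat.cast_add, Nat.cast_one] at hlt
    simp only [hitSum]
    rw [if_neg, ih (pos + 1) (by omega) (by omega)]
    · simp
    · rw [Int.emod_eq_of_lt (by omega) (by omega)]
      omega

lemma ediv_step (m x : Int) (hm : 0 < m) :
    (x + 1) / m = x / m + (if (x + 1) % m = 0 then 1 else 0) := by
  have h1 := Int.ediv_add_emod x m
  have h2 := Int.ediv_add_emod (x + 1) m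
  have hr0 : 0 ≤ x % m := Int.emod_nonneg x (by omega)
  have hr0' : x % m < m := Int.emod_lt_of_pos x hm
  have hr1 : 0 ≤ (x + 1) % m := Int.emod_nonneg _ (by omega)
  have hr1' : (x + 1) % m < m := Int.emod_lt_of_pos _ hm
  split_ifs with h
  · have key : m * ((x + 1) / m - x / m) = x % m + 1 := by
      rw [mul_sub]; linarith
    have h3 : 0 < (x + 1) / m - x / m := by
      by_contra hc
      push_neg at hc
      have := mul_nonpos_of_nonneg_of_nonpos (le_of_lt hm) hc
      linarith
    have h4 : (x + 1) / m - x / m < 2 := by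
      by_contra hc
      push_neg at hc
      have := mul_le_mul_of_nonneg_left hc (le_of_lt hm)
      linarith
    have h5 : 1 ≤ (x + 1) / m - x / m := Int.lt_iff_add_one_le.mp h3
    have h6 : (x + 1) / m - x / m ≤ 1 := by
      have := Int.lt_iff_add_one_le.mp h4
      omega
    linarith
  · have key : m * ((x + 1) / m - x / m) = x % m + 1 - (x + 1) % m := by
      rw [mul_sub]; linarith
    have hr1p : 1 ≤ (x + 1) % m := by
      rcases lt_or_eq_of_le hr1 with hlt | heq
      · exact Int.lt_iff_add_one_le.mp hlt
      · exact absurd heq.symm h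
    have h3 : (x + 1) / m - x / m < 1 := by
      by_contra hc
      push_neg at hc
      have := mul_le_mul_of_nonneg_left hc (le_of_lt hm)
      linarith
    have h4 : -1 < (x + 1) / m - x / m := by
      by_contra hc
      push_neg at hc
      have := mul_le_mul_of_nonneg_left hc (le_of_lt hm)
      linarith
    have h5 : (x + 1) / m - x / m ≤ 0 := by
      have := Int.lt_iff_add_one_le.mp h3
      omega
    have h6 : 0 ≤ (x + 1) / m - x / m := by
      have := Int.lt_iff_add_one_le.mp h4
      omega
    linarith

lemma hitSum_replicate (m v : Int) (hm : 0 < m) :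
    ∀ (n : Nat) (pos : Int),
      hitSum m pos (List.replicate n v) = ((pos + (n : Int)) / m - pos / m) * v := by
  intro n
  induction n with
  | zero => intro pos; simp [hitSum]
  | succ n ih =>
    intro pos
    rw [List.replicate_succ]
    simp only [hitSum]
    rw [ih (pos + 1)]
    have hc : pos + ((n + 1 : Nat) : Int) = pos + 1 + (n : Int) := by push_cast; ring
    rw [hc, ediv_step m pos hm]
    split_ifs with h
    · ring
    · ring

lemma hitSum_take (m : Int) (hm : 0 < m) (d : List Int) (hlen : m ≤ (d.length : Int)) :
    hitSum m 0 (d.take m.toNat) = PySem.List.pyGetD d (m - 1) 0 := by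
  have hu : (d.take m.toNat).length = m.toNat := by
    simp [List.length_take]; omega
  have hne : d.take m.toNat ≠ [] := by
    simp [List.length_pos_iff.symm, hu]; omega
  rw [← List.dropLast_append_getLast hne, hitSum_append]
  have hdl : (d.take m.toNat).dropLast.length = m.toNat - 1 := by
    simp [List.length_dropLast, hu]
  rw [hitSum_small m _ 0 (le_refl 0) (by rw [hdl]; omega)]
  simp only [hitSum, hdl]
  have hpos : (0 : Int) + ((m.toNat - 1 : Nat) : Int) + 1 = m := by omega
  rw [hpos, Int.emod_self, if_pos rfl]
  have hgl : (d.take m.toNat).getLast hne = d[m.toNat - 1]'(by omega) := by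
    rw [List.getLast_eq_getElem]
    simp only [hu]
    exact List.getElem_take
  rw [PySem.List.pyGetD_eq_getElem d 0 (by omega) (by omega)]
  have hidx : (m - 1).toNat = m.toNat - 1 := by omega
  simp [hgl, hidx]

lemma gsum_eq_hitSum (m : Int) (hm : 0 < m) :
    ∀ (n : Nat) (d : List Int), d.length = n →
    ((PySem.List.pyRange (m - 1) (d.length : Int) m).map
      (fun i => PySem.List.pyGetD d i 0)).sum = hitSum m 0 d := by
  intro n
  induction n using Nat.strong_induction_on with
  | _ n ih =>
    intro d hlen
    by_cases hsize : (d.length : Int) < m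
    · rw [pyRange_pos_nil (m-1) _ m hm (by omega)]
      simp only [List.map_nil, List.sum_nil]
      exact (hitSum_small m d 0 (le_refl 0) (by omega)).symm
    · rw [not_lt] at hsize
      have hmt2 : m.toNat ≤ d.length := by omega
      set t := d.drop m.toNat with ht
      have hlt : (t.length : Int) = (d.length : Int) - m := by
        simp [ht]; omega
      have hihlen : t.length < n := by
        simp [ht]; omega
      have IH := ih t.length hihlen t rfl
      rw [pyRange_pos_cons (m-1) _ m hm (by omega)]
      have hBtail : PySem.List.pyRange (m - 1 + m) (d.length : Int) m
          = (PySem.List.pyRange (m-1) ((d.length : Int) - m) m).map (fun x => x + m) :=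
        pyRange_pos_shift_step (m-1) _ m hm
      rw [hBtail]
      simp only [List.map_cons, List.sum_cons, List.map_map]
      have hmapB : ((PySem.List.pyRange (m-1) ((d.length : Int) - m) m).map
          ((fun i => PySem.List.pyGetD d i 0) ∘ (fun x => x + m))).sum
          = ((PySem.List.pyRange (m-1) (t.length : Int) m).map
          (fun i => PySem.List.pyGetD t i 0)).sum := by
        rw [hlt]
        apply congrArg
        apply List.map_congr_left
        intro x hx
        have hx0 : m - 1 ≤ x := ((PySem.List.mem_pyRange_iff_of_pos hm x).mp hx).1
        simp only [Function.comp]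
        rw [PySem.List.pyGetD_of_nonneg _ _ (by omega), PySem.List.pyGetD_of_nonneg _ _ (by omega),
          ht, List.getD_eq_getElem?_getD, List.getD_eq_getElem?_getD, List.getElem?_drop]
        have : m.toNat + x.toNat = (x + m).toNat := by omega
        rw [this]
      rw [hmapB, IH]
      -- the hitSum side: split off the first m elements
      conv_rhs => rw [← List.take_append_drop m.toNat d]
      rw [hitSum_append, hitSum_take m hm d (by omega)]
      have hu : ((d.take m.toNat).length : Int) = m := by
        simp [List.length_take]; omega
      rw [hu]
      rw [hitSum_period m _ 0]

lemma count_flatMap_replicate (c : Int → Nat) (x : Int) :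
    ∀ (ks : List Int), ks.Nodup →
      (ks.flatMap (fun v => List.replicate (c v) v)).count x
        = if x ∈ ks then c x else 0 := by
  intro ks
  induction ks with
  | nil => intro _; simp
  | cons v ks ih =>
    intro hnd
    rcases List.nodup_cons.mp hnd with ⟨hv, hnd'⟩
    rw [List.flatMap_cons, List.count_append, List.count_replicate, ih hnd']
    by_cases hx : x = v
    · subst hx
      simp [hv]
    · simp [hx, Ne.symm hx]

lemma sorted_eq_flat (score : List Int) :
    PySem.List.sorted score (fun x => x) true
      = (PySem.List.sorted (PySem.Set.ofList score) (fun x => x) true).flatMap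
          (fun v => List.replicate (List.count v score) v) := by
  set ks := PySem.List.sorted (PySem.Set.ofList score) (fun x => x) true with hks
  have hnd : ks.Nodup :=
    ((PySem.List.sorted_perm (PySem.Set.ofList score) (fun x => x) true).nodup_iff).mpr
      (PySem.Set.nodup_ofList score)
  have hperm : (ks.flatMap (fun v => List.replicate (List.count v score) v)).Perm score := by
    rw [List.perm_iff_count]
    intro a
    rw [count_flatMap_replicate (fun v => List.count v score) a ks hnd]
    by_cases ha : a ∈ ks
    · rw [if_pos ha]
    · rw [if_neg ha]
      have hns : a ∉ score := by
        intro hmem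
        exact ha (by rw [hks, PySem.List.mem_sorted]; exact (PySem.Set.mem_ofList score a).mpr hmem)
      exact (List.count_eq_zero.mpr hns).symm
  have hpflat : (ks.flatMap (fun v => List.replicate (List.count v score) v)).Pairwise
      (fun a b => b ≤ a) := by
    rw [List.pairwise_flatMap]
    constructor
    · intro a _
      rw [List.pairwise_replicate]
      right; exact le_refl a
    · refine (PySem.List.sorted_pairwise_rev (PySem.Set.ofList score) (fun x => x)).imp ?_
      intro a b hba x hx y hy
      rw [List.eq_of_mem_replicate hx, List.eq_of_mem_replicate hy]
      exact hba
  apply PySem.List.eq_of_perm_of_pairwise_le_of_injective (key := fun x : Int => -x) neg_injective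
  · exact (PySem.List.sorted_perm score (fun x => x) true).trans hperm.symm
  · exact (PySem.List.sorted_pairwise_rev score (fun x => x)).imp (fun h => neg_le_neg h)
  · exact hpflat.imp (fun h => neg_le_neg h)

lemma fold_runs (m : Int) (hm : 0 < m) (c : Int → Nat) :
    ∀ (ks : List Int) (T P : Int),
    (ks.foldl (fun (tp : Int × Int) v =>
        (tp.1 + (PySem.Int.floordiv (tp.2 + ((c v : Nat) : Int)) m
            - PySem.Int.floordiv tp.2 m) * v,
         tp.2 + ((c v : Nat) : Int))) (T, P)).1
      = T + hitSum m P (ks.flatMap (fun v => List.replicate (c v) v)) := by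
  intro ks
  induction ks with
  | nil => intro T P; simp [hitSum]
  | cons v ks ih =>
    intro T P
    rw [List.foldl_cons, ih, List.flatMap_cons, hitSum_append, List.length_replicate,
      hitSum_replicate m v hm (c v) P,
      PySem.Int.floordiv_eq_ediv_of_pos hm, PySem.Int.floordiv_eq_ediv_of_pos hm, add_assoc]

-- ===== VERDICT (by name: the statement is the Claim_ definition above) =====
theorem solution_spec : Claim_equal_solution := by
  intro k m score _ hm
  unfold Spec_solution
  simp only [solution, solution_alt, PySem.List.len_eq]
  rw [PySem.Dict.foldl_insert_getD_add_one_eq_counter, PySem.Dict.keys_counter]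
  simp only [PySem.Dict.getD_counter]
  rw [fold_runs m hm (fun v => List.count v score) _ 0 0, zero_add, ← sorted_eq_flat]
  set d := PySem.List.sorted score (fun x => x) true with hd
  have hp : d.Pairwise (fun a b => b ≤ a) := PySem.List.sorted_pairwise_rev score (fun x => x)
  have hfold1 : (PySem.List.pyRange 0 (d.length : Int) m).foldl
      (fun res i =>
        if ((PySem.List.slice d (some i) (some (i + m))).length : Int) = m then
          res + (PySem.List.min? (PySem.List.slice d (some i) (some (i + m))) (fun x => x)).getD 0 * m
        else res) 0
      = ((PySem.List.pyRange 0 (d.length : Int) m).map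
        (fun i => if ((PySem.List.slice d (some i) (some (i + m))).length : Int) = m then
          (PySem.List.min? (PySem.List.slice d (some i) (some (i + m))) (fun x => x)).getD 0 * m
        else 0)).sum := by
    rw [PySem.List.foldl_congr_mem _ _
      (fun res i =>
        res + (if ((PySem.List.slice d (some i) (some (i + m))).length : Int) = m then
          (PySem.List.min? (PySem.List.slice d (some i) (some (i + m))) (fun x => x)).getD 0 * m
        else 0)) 0
      (by
        intro acc x _
        by_cases h : ((PySem.List.slice d (some x) (some (x + m))).length : Int) = m
        · simp only [if_pos h]
        · simp only [if_neg h, add_zero])]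
    rw [PySem.List.foldl_add]
    simp
  have hm' : 0 < m := hm
  exact hfold1.trans ((sums_eq m hm' d.length d rfl hp).trans
    (congrArg (fun z => m * z) (gsum_eq_hitSum m hm' d.length d rfl)))
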